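-- pv_equiv track=rewrite | github.com/atvKail/solve | SolutionsOnSites/Codeforces/Codeforces Round 1013 (Div. 3)/D.py | max_in_row
-- ===== SOURCE A (Python) =====
-- def max_in_row(m, L):
--     if L >= m:
--         return m
--     B0 = (m + 1) // (L + 1)
--     best = 0
--     for B in [B0, B0 + 1]:
--         if B < 1 or B > m + 1:
--             continue
--         cand = min(B * L, m - B + 1)
--         best = max(best, cand)
--     return best
-- ===== SOURCE B (Python) =====
-- def max_in_row(m, L):
--     if L >= m:
--         return m
--     if m < 0 or L < 0:
--         return 0
--     # binary search the smallest B in [1, m+1] with B*L >= m - B + 1;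
--     # the maximum of min(B*L, m-B+1) is at that B or the one before it
--     lo, hi = 1, m + 1
--     while lo < hi:
--         mid = (lo + hi) // 2
--         if mid * L >= m - mid + 1:
--             hi = mid
--         else:
--             lo = mid + 1
--     best = min(lo * L, m - lo + 1)
--     if lo > 1:
--         best = max(best, min((lo - 1) * L, m - lo + 2))
--     return best
-- ===== Notes on version B (the rewrite author's own statement) =====
-- stated objective: alternative
-- what changed: Replaces the floor-division two-candidate closed form with a binary search over block counts B for the smallest B with B*L >= m-B+1, then compares that B with its predecessor; no division is performed.
import Mathlib
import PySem

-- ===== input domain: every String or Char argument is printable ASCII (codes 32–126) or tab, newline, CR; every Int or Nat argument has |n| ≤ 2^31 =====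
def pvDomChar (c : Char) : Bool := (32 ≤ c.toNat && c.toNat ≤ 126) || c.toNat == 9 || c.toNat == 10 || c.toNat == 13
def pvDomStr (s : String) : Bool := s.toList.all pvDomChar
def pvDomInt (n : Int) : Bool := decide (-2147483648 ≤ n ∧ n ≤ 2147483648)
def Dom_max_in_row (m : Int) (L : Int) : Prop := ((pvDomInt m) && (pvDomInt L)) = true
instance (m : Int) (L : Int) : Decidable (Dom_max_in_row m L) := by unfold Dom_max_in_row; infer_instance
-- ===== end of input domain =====

-- B replaces A's floor-division two-candidate closed form by a binary search for the
-- crossover block count (alternative decomposition; no division).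

-- ===== PORT A =====
def max_in_row (m : Int) (L : Int) : Int :=
  if L ≥ m then m
  else
    let B0 := PySem.Int.floordiv (m + 1) (L + 1)
    [B0, B0 + 1].foldl (fun best B =>
      if B < 1 ∨ B > m + 1 then best
      else max best (min (B * L) (m - B + 1))) 0

-- ===== PORT B =====
-- the while-loop of Source B: shrink [lo, hi] to the smallest B with B*L ≥ m - B + 1
def bsearch (m L lo hi : Int) : Int :=
  if h : lo < hi then
    let mid := PySem.Int.floordiv (lo + hi) 2
    if mid * L ≥ m - mid + 1 then bsearch m L lo mid
    else bsearch m L (mid + 1) hi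
  else lo
termination_by (hi - lo).toNat
decreasing_by
  · have h1 := PySem.Int.floordiv_two_mid_bounds (le_of_lt h)
    have h2 : PySem.Int.floordiv (lo + hi) 2 < hi :=
      (PySem.Int.floordiv_lt_iff_lt_mul (by omega)).mpr (by omega)
    omega
  · have h1 := PySem.Int.floordiv_two_mid_bounds (le_of_lt h)
    omega

def max_in_row_alt (m : Int) (L : Int) : Int :=
  if L ≥ m then m
  else if m < 0 ∨ L < 0 then 0
  else
    let lo := bsearch m L 1 (m + 1)
    let best := min (lo * L) (m - lo + 1)
    if lo > 1 then max best (min ((lo - 1) * L) (m - lo + 2)) else best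

-- ===== PRECONDITION & SPEC =====
-- Pre_ excludes exactly the inputs where A raises ZeroDivisionError (L = -1 with m ≥ 0,
-- where the divisor L + 1 is zero).
def Pre_max_in_row (m : Int) (L : Int) : Prop := ¬ (L = -1 ∧ 0 ≤ m)
instance (m : Int) (L : Int) : Decidable (Pre_max_in_row m L) := by unfold Pre_max_in_row; infer_instance
def pvWitness_max_in_row : Int × Int := (10, 2)

def Spec_max_in_row (m : Int) (L : Int) (out : Int) : Prop := out = max_in_row_alt m L
instance (m : Int) (L : Int) (out : Int) : Decidable (Spec_max_in_row m L out) := by unfold Spec_max_in_row; infer_instance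

-- ===== CLAIM (what is proved, stated in full; the proofs are below) =====
def Claim_equal_max_in_row : Prop := ∀ (m : Int) (L : Int), Dom_max_in_row m L → Pre_max_in_row m L → Spec_max_in_row m L (max_in_row m L)

-- ===== LEMMAS AND PROOFS =====

-- binary-search invariant: starting from lo ≤ hi with the predicate true at hi, the
-- result r satisfies lo ≤ r ≤ hi, the predicate holds at r, and fails at r - 1 (or r = lo)
theorem bsearch_inv (m L : Int) : ∀ (n : Nat) (lo hi : Int), (hi - lo).toNat = n →
    lo ≤ hi → hi * L ≥ m - hi + 1 →
    lo ≤ bsearch m L lo hi ∧ bsearch m L lo hi ≤ hi ∧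
      (bsearch m L lo hi) * L ≥ m - (bsearch m L lo hi) + 1 ∧
      (bsearch m L lo hi = lo ∨
        ¬ ((bsearch m L lo hi - 1) * L ≥ m - (bsearch m L lo hi - 1) + 1)) := by
  intro n
  induction n using Nat.strong_induction_on with
  | _ n ih =>
    intro lo hi hn hle hP
    rw [bsearch]
    by_cases hlt : lo < hi
    · simp only [dif_pos hlt]
      have hmid := PySem.Int.floordiv_two_mid_bounds (le_of_lt hlt)
      have hmidlt : PySem.Int.floordiv (lo + hi) 2 < hi :=
        (PySem.Int.floordiv_lt_iff_lt_mul (by omega)).mpr (by omega)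
      set mid : Int := PySem.Int.floordiv (lo + hi) 2 with hm
      clear_value mid
      by_cases hp : mid * L ≥ m - mid + 1
      · simp only [if_pos hp]
        have := ih (mid - lo).toNat (by omega) lo mid rfl (by omega) hp
        exact ⟨this.1, by omega, this.2.2.1, this.2.2.2⟩
      · simp only [if_neg hp]
        have := ih (hi - (mid + 1)).toNat (by omega) (mid + 1) hi rfl (by omega) hP
        refine ⟨by omega, this.2.1, this.2.2.1, Or.inr ?_⟩
        rcases this.2.2.2 with h | h
        · rw [h]; simpa using hp
        · exact h
    · simp only [dif_neg hlt]
      have : lo = hi := by omega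
      subst this
      exact ⟨le_refl _, le_refl _, hP, Or.inl trivial⟩

theorem max_in_row_spec : Claim_equal_max_in_row := by
  intro m L _ hpre
  unfold Spec_max_in_row max_in_row max_in_row_alt
  by_cases hLm : L ≥ m
  · simp [hLm]
  · simp only [if_neg hLm, List.foldl]
    set q : Int := PySem.Int.floordiv (m + 1) (L + 1) with hq
    clear_value q
    by_cases hneg : m < 0 ∨ L < 0
    · rw [if_pos hneg]
      by_cases hm : m + 1 ≤ 0
      · -- m ≤ -1 : both of A's candidates are out of range
        rw [if_pos (show q < 1 ∨ q > m + 1 by omega),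
          if_pos (show q + 1 < 1 ∨ q + 1 > m + 1 by omega)]
      · -- m ≥ 0 and L ≤ -2 (L = -1 is excluded by Pre_): every candidate value is < 0
        have hL2 : L ≤ -2 := by
          rcases eq_or_ne L (-1) with h | h
          · exact absurd ⟨h, by omega⟩ hpre
          · omega
        have hgle : ∀ B : Int, 1 ≤ B → min (B * L) (m - B + 1) ≤ 0 := by
          intro B h1
          have h2 : 0 ≤ B * (-L) := mul_nonneg (by omega) (by omega)
          have h3 : B * (-L) = -(B * L) := by ring
          exact le_trans (min_le_left _ _) (by omega)
        have hstep : ∀ b B : Int, b = 0 →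
            (if B < 1 ∨ B > m + 1 then b else max b (min (B * L) (m - B + 1))) = 0 := by
          intro b B hb0
          subst hb0
          split_ifs with h
          · rfl
          · exact max_eq_left (hgle B (by omega))
        exact hstep _ (q + 1) (hstep 0 q rfl)
    · -- 0 ≤ L < m, so m ≥ 1: compare the closed form with the binary search
      rw [if_neg hneg]
      have hL0 : 0 ≤ L := by omega
      have hm1 : 1 ≤ m := by omega
      have hb : (0:Int) < L + 1 := by omega
      have hbr := (PySem.Int.floordiv_eq_iff_of_pos hb).mp hq.symm
      have hexp1 : q * (L + 1) = q * L + q := by ring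
      have hexp2 : (q + 1) * (L + 1) = q * L + q + L + 1 := by ring
      have hkey1 : q * L + q ≤ m + 1 := by rw [← hexp1]; exact hbr.1
      have hkey2 : m + 1 < q * L + q + L + 1 := by rw [← hexp2]; exact hbr.2
      have hq1 : 1 ≤ q := by
        rw [hq]
        exact (PySem.Int.le_floordiv_iff_mul_le hb).mpr (by omega)
      have hql0 : 0 ≤ q * L := mul_nonneg (by omega) hL0
      have hqm : q ≤ m + 1 := by omega
      have hrinv := bsearch_inv m L (m + 1 - 1).toNat 1 (m + 1) rfl (by omega)
        (by have : (m + 1) * L = m * L + L := by ring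
            have : 0 ≤ m * L := mul_nonneg (by omega) hL0
            omega)
      set r : Int := bsearch m L 1 (m + 1) with hr
      clear_value r
      obtain ⟨hr1, hrm, hrP, hrmin⟩ := hrinv
      have hrexp : r * (L + 1) = r * L + r := by ring
      by_cases hPq : q * L + q ≥ m + 1
      · -- exact crossover: q*(L+1) = m+1; both sides reduce to q*L
        have heq : q * L + q = m + 1 := by omega
        -- q ≥ 2 (q = 1 would force L = m), so the r = 1 escape of the invariant is vacuous
        have hq2 : 2 ≤ q := by
          rcases eq_or_lt_of_le hq1 with h | h
          · exfalso; rw [← h] at heq; simp at heq; omega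
          · omega
        have hrgeq : q ≤ r := by
          by_contra hc
          push_neg at hc
          have : r * (L + 1) < q * (L + 1) := by
            exact mul_lt_mul_of_pos_right hc hb
          omega
        have hrleq : r ≤ q := by
          rcases hrmin with h | h
          · omega
          · by_contra hc
            push_neg at hc
            have h1 : q ≤ r - 1 := by omega
            have h2 : q * (L + 1) ≤ (r - 1) * (L + 1) := by
              exact mul_le_mul_of_nonneg_right h1 (by omega)
            have h3 : (r - 1) * (L + 1) = (r - 1) * L + r - 1 := by ring
            omega
        have hrq : r = q := le_antisymm hrleq hrgeq
        subst hrq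
        rw [if_pos (show r > 1 by omega)]
        have hfq : min (r * L) (m - r + 1) = r * L := min_eq_left (by omega)
        have hfq1 : min ((r - 1) * L) (m - r + 2) = (r - 1) * L := by
          refine min_eq_left ?_
          have : (r - 1) * L = r * L - L := by ring
          omega
        have hmono : (r - 1) * L ≤ r * L :=
          mul_le_mul_of_nonneg_right (by omega) hL0
        rw [hfq, hfq1, max_eq_left hmono,
          if_neg (show ¬(r < 1 ∨ r > m + 1) by omega), max_eq_right hql0]
        -- A's second candidate r + 1 (if in range) gives m - r = r*L - 1 < r*L
        by_cases h2 : r + 1 < 1 ∨ r + 1 > m + 1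
        · rw [if_pos h2]
        · rw [if_neg h2]
          have hmr : min ((r + 1) * L) (m - (r + 1) + 1) = m - r := by
            have he : m - (r + 1) + 1 = m - r := by ring
            rw [he]
            refine min_eq_right ?_
            have : (r + 1) * L = r * L + L := by ring
            omega
          rw [hmr, max_eq_left (by omega)]
      · -- strict crossover: r = q + 1; both sides are max(q*L, m - q)
        have hrgeq : q + 1 ≤ r := by
          by_contra hc
          push_neg at hc
          have h1 : r ≤ q := by omega
          have h2 : r * (L + 1) ≤ q * (L + 1) := mul_le_mul_of_nonneg_right h1 (by omega)
          omega
        have hrleq : r ≤ q + 1 := by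
          rcases hrmin with h | h
          · omega
          · by_contra hc
            push_neg at hc
            have h1 : q + 1 ≤ r - 1 := by omega
            have h2 : (q + 1) * (L + 1) ≤ (r - 1) * (L + 1) :=
              mul_le_mul_of_nonneg_right h1 (by omega)
            have h3 : (r - 1) * (L + 1) = (r - 1) * L + r - 1 := by ring
            omega
        have hrq : r = q + 1 := le_antisymm hrleq hrgeq
        subst hrq
        have hqm' : q + 1 ≤ m + 1 := by omega
        rw [if_pos (show q + 1 > 1 by omega)]
        have hfq1 : min ((q + 1) * L) (m - (q + 1) + 1) = m - q := by
          have h1 : m - (q + 1) + 1 = m - q := by ring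
          have h2 : (q + 1) * L = q * L + L := by ring
          rw [h1]
          exact min_eq_right (by omega)
        have hfq : min ((q + 1 - 1) * L) (m - (q + 1) + 2) = q * L := by
          have h1 : q + 1 - 1 = q := by ring
          have h2 : m - (q + 1) + 2 = m - q + 1 := by ring
          rw [h1, h2]
          exact min_eq_left (by omega)
        rw [hfq1, hfq,
          if_neg (show ¬(q < 1 ∨ q > m + 1) by omega),
          min_eq_left (show q * L ≤ m - q + 1 by omega), max_eq_right hql0,
          if_neg (show ¬(q + 1 < 1 ∨ q + 1 > m + 1) by omega)]
        exact max_comm _ _
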